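-- pv_equiv track=rewrite | github.com/Wierni-Fanowie-wasatego-dziekana/Zadanka | main.py | trojki
-- ===== SOURCE A (Python) =====
-- def one_is_biggest_divider_of_three(a,b,c):
--     a1,b1,c1 = a, b, c
--     while b1 > 0:
--         a1, b1 = b1, a1 % b1
--     if a1 != 1:
--         return False
--
--     a2, b2, c2 = a, b ,c
--     while a2 >0:
--         c2, a2 = a2, c2 % a2
--     if c2 != 1:
--         return False
--
--     while b > 0:
--         c, b = b, c % b
--     return c == 1
--
-- def trojki(T):
--     def iterate(counter = 0):
--
--         if len(T) < 3:
--             return 0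
--
--         for i in range(0,len(T)):
--             if i + 2 < len(T) and one_is_biggest_divider_of_three(T[i],T[i + 1],T[i + 2]):
--                 counter += 1
--             if i + 3 < len(T) and one_is_biggest_divider_of_three(T[i], T[i + 2], T[i + 3]):
--                 counter += 1
--             if i + 3 < len(T) and one_is_biggest_divider_of_three(T[i], T[i + 1],T[i + 3]):
--                 counter += 1
--             if i + 4 < len(T) and one_is_biggest_divider_of_three(T[i],T[i + 2],T[i + 4]):
--                 counter += 1
--
--         return counter
--
--     return iterate()
-- ===== SOURCE B (Python) =====
-- def trojki(T):
--     n = len(T)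
--
--     def coprime(a, b):
--         while b > 0:
--             a, b = b, a % b
--         return a == 1
--
--     def fwd(d):  # fwd(d)[p] == coprime(T[p], T[p+d])
--         return [coprime(T[p], T[p + d]) for p in range(n - d)]
--
--     def bwd(d):  # bwd(d)[p] == coprime(T[p+d], T[p])
--         return [coprime(T[p + d], T[p]) for p in range(n - d)]
--
--     # coprimality index: every pair gcd is computed once, then reused by the triples sharing it
--     f1, f2 = fwd(1), fwd(2)
--     b1, b2, b3, b4 = bwd(1), bwd(2), bwd(3), bwd(4)
--
--     total = 0
--     for i in range(n):
--         if i + 2 < n and f1[i] and b2[i] and b1[i + 1]: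
--             total += 1
--         if i + 3 < n and f2[i] and b3[i] and b1[i + 2]:
--             total += 1
--         if i + 3 < n and f1[i] and b3[i] and b2[i + 1]:
--             total += 1
--         if i + 4 < n and f2[i] and b4[i] and b2[i + 2]:
--             total += 1
--     return total
-- ===== Notes on version B (the rewrite author's own statement) =====
-- stated objective: alternative
-- what changed: B tabulates every needed pair-coprimality flag once into six offset arrays (same Euclid loop as A's helper), then counts the four offset-triples per window by array lookup, instead of A's helper recomputing the three gcds inline for every triple.
import Mathlib
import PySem

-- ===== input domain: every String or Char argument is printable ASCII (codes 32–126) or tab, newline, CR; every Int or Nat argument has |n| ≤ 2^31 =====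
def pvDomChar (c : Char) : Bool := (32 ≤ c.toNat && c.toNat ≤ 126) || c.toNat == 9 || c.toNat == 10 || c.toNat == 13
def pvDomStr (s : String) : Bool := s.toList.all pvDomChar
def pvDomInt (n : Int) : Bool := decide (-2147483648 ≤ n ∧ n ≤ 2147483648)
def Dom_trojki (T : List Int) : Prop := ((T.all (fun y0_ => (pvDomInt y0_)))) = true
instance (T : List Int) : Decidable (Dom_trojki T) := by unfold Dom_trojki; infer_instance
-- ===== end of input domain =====

-- B tabulates every needed pair-coprimality flag once (same Euclid loop as A's helper) into six
-- offset arrays, then counts the four offset-triples per i by array lookup, instead of A's helper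
-- recomputing the three gcds inline for every triple (objective: alternative).

-- ===== PORT A =====
-- the Euclid loop 'while b > 0: a, b = b, a % b' (result a) shared by all three checks in A's helper
def euclidA (a b : Int) : Int :=
  if h : 0 < b then euclidA b (PySem.Int.mod a b) else a
termination_by b.toNat
decreasing_by
  have h1 := PySem.Int.mod_nonneg (a := a) (b := b) h
  have h2 := PySem.Int.mod_lt (a := a) (b := b) h
  omega

def oneIsBiggestDividerOfThree (a b c : Int) : Bool :=
  if euclidA a b ≠ 1 then false
  else if euclidA c a ≠ 1 then false
  else decide (euclidA c b = 1)

-- T[i] for an index the guards keep in range (0 ≤ i < len T); default never reached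
def pyG (T : List Int) (i : Int) : Int := PySem.List.pyGetD T i 0

def trojki (T : List Int) : Int :=
  if T.length < 3 then 0
  else
    (PySem.List.pyRange 0 (T.length : Int) 1).foldl (fun counter i =>
      let counter := if decide (i + 2 < (T.length : Int)) && oneIsBiggestDividerOfThree (pyG T i) (pyG T (i+1)) (pyG T (i+2)) then counter + 1 else counter
      let counter := if decide (i + 3 < (T.length : Int)) && oneIsBiggestDividerOfThree (pyG T i) (pyG T (i+2)) (pyG T (i+3)) then counter + 1 else counter
      let counter := if decide (i + 3 < (T.length : Int)) && oneIsBiggestDividerOfThree (pyG T i) (pyG T (i+1)) (pyG T (i+3)) then counter + 1 else counter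
      if decide (i + 4 < (T.length : Int)) && oneIsBiggestDividerOfThree (pyG T i) (pyG T (i+2)) (pyG T (i+4)) then counter + 1 else counter) 0

-- ===== PORT B =====
def euclidB (a b : Int) : Int :=
  if h : 0 < b then euclidB b (PySem.Int.mod a b) else a
termination_by b.toNat
decreasing_by
  have h1 := PySem.Int.mod_nonneg (a := a) (b := b) h
  have h2 := PySem.Int.mod_lt (a := a) (b := b) h
  omega

def coprimeB (a b : Int) : Bool := decide (euclidB a b = 1)

-- Source B's fwd(d): [coprime(T[p], T[p+d]) for p in range(n-d)]
def fwdList (T : List Int) (d : Int) : List Bool :=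
  (PySem.List.pyRange 0 ((T.length : Int) - d) 1).map (fun p => coprimeB (pyG T p) (pyG T (p + d)))

-- Source B's bwd(d): [coprime(T[p+d], T[p]) for p in range(n-d)]
def bwdList (T : List Int) (d : Int) : List Bool :=
  (PySem.List.pyRange 0 ((T.length : Int) - d) 1).map (fun p => coprimeB (pyG T (p + d)) (pyG T p))

-- L[i] for an index the guards keep in range; default never reached
def pyB (L : List Bool) (i : Int) : Bool := PySem.List.pyGetD L i false

def trojki_alt (T : List Int) : Int :=
  let f1 := fwdList T 1
  let f2 := fwdList T 2
  let b1 := bwdList T 1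
  let b2 := bwdList T 2
  let b3 := bwdList T 3
  let b4 := bwdList T 4
  (PySem.List.pyRange 0 (T.length : Int) 1).foldl (fun total i =>
    let total := if decide (i + 2 < (T.length : Int)) && pyB f1 i && pyB b2 i && pyB b1 (i+1) then total + 1 else total
    let total := if decide (i + 3 < (T.length : Int)) && pyB f2 i && pyB b3 i && pyB b1 (i+2) then total + 1 else total
    let total := if decide (i + 3 < (T.length : Int)) && pyB f1 i && pyB b3 i && pyB b2 (i+1) then total + 1 else total
    if decide (i + 4 < (T.length : Int)) && pyB f2 i && pyB b4 i && pyB b2 (i+2) then total + 1 else total) 0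

-- ===== PRECONDITION & SPEC =====
def Spec_trojki (T : List Int) (out : Int) : Prop := out = trojki_alt T
instance (T : List Int) (out : Int) : Decidable (Spec_trojki T out) := by unfold Spec_trojki; infer_instance

-- ===== CLAIM (what is proved, stated in full; the proofs are below) =====
def Claim_equal_trojki : Prop := ∀ (T : List Int), Dom_trojki T → Spec_trojki T (trojki T)

-- ===== LEMMAS AND PROOFS =====
theorem euclidB_eq (a b : Int) : euclidB a b = euclidA a b := by
  rw [euclidB, euclidA]
  split_ifs with h
  · exact euclidB_eq b (PySem.Int.mod a b)
  · rfl
termination_by b.toNat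
decreasing_by
  have h1 := PySem.Int.mod_nonneg (a := a) (b := b) h
  have h2 := PySem.Int.mod_lt (a := a) (b := b) h
  omega

theorem oibdot_eq (a b c : Int) :
    oneIsBiggestDividerOfThree a b c = (coprimeB a b && coprimeB c a && coprimeB c b) := by
  unfold oneIsBiggestDividerOfThree coprimeB
  simp only [euclidB_eq]
  split_ifs with h1 h2 <;> simp_all

theorem fwd_get (T : List Int) (d i : Int) (hi : 0 ≤ i) (hin : i < (T.length : Int) - d) :
    pyB (fwdList T d) i = coprimeB (pyG T i) (pyG T (i + d)) := by
  unfold pyB fwdList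
  rw [PySem.List.pyGetD_map_pyRange_of_nonneg _ _ _ _ hi hin]

theorem bwd_get (T : List Int) (d i : Int) (hi : 0 ≤ i) (hin : i < (T.length : Int) - d) :
    pyB (bwdList T d) i = coprimeB (pyG T (i + d)) (pyG T i) := by
  unfold pyB bwdList
  rw [PySem.List.pyGetD_map_pyRange_of_nonneg _ _ _ _ hi hin]

theorem cond_bridge (T : List Int) (i d1 d2 : Int) (hi : 0 ≤ i) (hd1 : 0 < d1) (hd12 : d1 < d2) :
    (decide (i + d2 < (T.length : Int))
        && oneIsBiggestDividerOfThree (pyG T i) (pyG T (i + d1)) (pyG T (i + d2)))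
      = (decide (i + d2 < (T.length : Int)) && pyB (fwdList T d1) i
          && pyB (bwdList T d2) i && pyB (bwdList T (d2 - d1)) (i + d1)) := by
  by_cases hk : i + d2 < (T.length : Int)
  · rw [fwd_get T d1 i hi (by omega), bwd_get T d2 i hi (by omega),
      bwd_get T (d2 - d1) (i + d1) (by omega) (by omega), oibdot_eq]
    have e : i + d1 + (d2 - d1) = i + d2 := by ring
    rw [e]
    simp [hk, Bool.and_assoc]
  · simp [hk]

-- ===== VERDICT (by name: the statement is the Claim_ definition above) =====
theorem trojki_spec : Claim_equal_trojki := by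
  unfold Claim_equal_trojki Spec_trojki
  intro T _
  unfold trojki trojki_alt
  by_cases h3 : T.length < 3
  · rw [if_pos h3]
    symm
    refine Eq.trans (PySem.List.foldl_congr_mem _ _ (fun (total : Int) (_ : Int) => total) 0 ?_) ?_
    swap
    · rw [PySem.List.foldl_ignore]
    intro total i hi
    rw [PySem.List.mem_pyRange_one] at hi
    have e2 : ¬ (i + 2 < (T.length : Int)) := by omega
    have e3 : ¬ (i + 3 < (T.length : Int)) := by omega
    have e4 : ¬ (i + 4 < (T.length : Int)) := by omega
    simp [e2, e3, e4]
  · rw [if_neg h3]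
    refine PySem.List.foldl_congr_mem _ _ _ _ ?_
    intro total i hi
    rw [PySem.List.mem_pyRange_one] at hi
    rw [cond_bridge T i 1 2 hi.1 (by omega) (by omega),
      cond_bridge T i 2 3 hi.1 (by omega) (by omega),
      cond_bridge T i 1 3 hi.1 (by omega) (by omega),
      cond_bridge T i 2 4 hi.1 (by omega) (by omega)]
    norm_num
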